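-- pv_equiv track=rewrite | github.com/DiegoAlviarez/nuevo-proyector | app3.py | explicar_fortaleza
-- ===== SOURCE A (Python) =====
-- def explicar_fortaleza(password):
--     explicaciones = []
--     if len(password) >= 12:
--         explicaciones.append("✅ Longitud adecuada (más de 12 caracteres)")
--     if any(c.isupper() for c in password):
--         explicaciones.append("✅ Contiene mayúsculas")
--     if any(c.isdigit() for c in password):
--         explicaciones.append("✅ Contiene números")
--     if any(c in "!@#$%^&*()" for c in password):
--         explicaciones.append("✅ Contiene símbolos especiales")
--     return explicaciones
-- ===== SOURCE B (Python) =====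
-- def explicar_fortaleza(password):
--     has_upper = has_digit = has_symbol = False
--     for c in password:
--         has_upper = has_upper or c.isupper()
--         has_digit = has_digit or c.isdigit()
--         has_symbol = has_symbol or (c in "!@#$%^&*()")
--     out = ["✅ Longitud adecuada (más de 12 caracteres)"] if len(password) >= 12 else []
--     if has_upper:
--         out.append("✅ Contiene mayúsculas")
--     if has_digit:
--         out.append("✅ Contiene números")
--     if has_symbol:
--         out.append("✅ Contiene símbolos especiales")
--     return out
-- ===== Notes on version B (the rewrite author's own statement) =====
-- stated objective: alternative
-- what changed: Replaces three separate any() generator scans over the password with one explicit pass accumulating has_upper/has_digit/has_symbol flags, then assembles the message list from the flags (one traversal, no generator overhead).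
import Mathlib
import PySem

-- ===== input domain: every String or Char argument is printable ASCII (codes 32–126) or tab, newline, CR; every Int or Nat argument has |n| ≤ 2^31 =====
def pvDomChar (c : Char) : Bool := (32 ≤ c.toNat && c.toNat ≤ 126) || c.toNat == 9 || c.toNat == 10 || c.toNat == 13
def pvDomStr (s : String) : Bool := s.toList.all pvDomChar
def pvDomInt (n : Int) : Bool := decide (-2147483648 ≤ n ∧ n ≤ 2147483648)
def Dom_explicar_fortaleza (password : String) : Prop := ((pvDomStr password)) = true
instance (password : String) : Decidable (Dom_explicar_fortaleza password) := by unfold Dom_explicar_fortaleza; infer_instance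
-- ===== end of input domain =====

-- ===== PORT A =====
-- B differs from A by one flag-accumulating pass instead of three any() scans (alternative decomposition, same cost).
def explicar_fortaleza (password : String) : List String :=
  let explicaciones : List String := []
  let explicaciones := if PySem.Str.len password ≥ 12 then explicaciones ++ ["✅ Longitud adecuada (más de 12 caracteres)"] else explicaciones
  let explicaciones := if password.toList.any (fun c => PySem.Chars.isupper c) then explicaciones ++ ["✅ Contiene mayúsculas"] else explicaciones
  let explicaciones := if password.toList.any (fun c => PySem.Chars.isdigit c) then explicaciones ++ ["✅ Contiene números"] else explicaciones
  let explicaciones := if password.toList.any (fun c => ("!@#$%^&*()".toList).contains c) then explicaciones ++ ["✅ Contiene símbolos especiales"] else explicaciones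
  explicaciones

-- ===== PORT B =====
def explicar_fortaleza_alt (password : String) : List String :=
  let flags := password.toList.foldl
    (fun (f : Bool × Bool × Bool) c =>
      (f.1 || PySem.Chars.isupper c,
       f.2.1 || PySem.Chars.isdigit c,
       f.2.2 || ("!@#$%^&*()".toList).contains c))
    (false, false, false)
  let out := if PySem.Str.len password ≥ 12 then ["✅ Longitud adecuada (más de 12 caracteres)"] else []
  let out := if flags.1 then out ++ ["✅ Contiene mayúsculas"] else out
  let out := if flags.2.1 then out ++ ["✅ Contiene números"] else out
  let out := if flags.2.2 then out ++ ["✅ Contiene símbolos especiales"] else out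
  out

-- ===== PRECONDITION & SPEC =====
def Spec_explicar_fortaleza (password : String) (out : List String) : Prop := out = explicar_fortaleza_alt password
instance (password : String) (out : List String) : Decidable (Spec_explicar_fortaleza password out) := by unfold Spec_explicar_fortaleza; infer_instance

-- ===== CLAIM (what is proved, stated in full; the proofs are below) =====
def Claim_equal_explicar_fortaleza : Prop := ∀ (password : String), Dom_explicar_fortaleza password → Spec_explicar_fortaleza password (explicar_fortaleza password)

-- ===== LEMMAS AND PROOFS =====
theorem pv_flags_fold (l : List Char) (a b c : Bool) :
    l.foldl (fun (f : Bool × Bool × Bool) ch =>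
      (f.1 || PySem.Chars.isupper ch, f.2.1 || PySem.Chars.isdigit ch,
       f.2.2 || ("!@#$%^&*()".toList).contains ch)) (a, b, c)
    = (a || l.any (fun ch => PySem.Chars.isupper ch),
       b || l.any (fun ch => PySem.Chars.isdigit ch),
       c || l.any (fun ch => ("!@#$%^&*()".toList).contains ch)) := by
  induction l generalizing a b c with
  | nil => simp
  | cons x xs ih =>
      rw [List.foldl_cons, ih]
      simp [Bool.or_assoc]

-- ===== VERDICT (by name: the statement is the Claim_ definition above) =====
theorem explicar_fortaleza_spec : Claim_equal_explicar_fortaleza := by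
  intro password _
  unfold Spec_explicar_fortaleza explicar_fortaleza explicar_fortaleza_alt
  simp only [pv_flags_fold, Bool.false_or]
  split_ifs <;> rfl
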